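-- pv_equiv track=rewrite | github.com/alaiasolkobreslin/bril | examples/l5.py | get_preds_cfg
-- ===== SOURCE A (Python) =====
-- def get_preds_cfg(cfg):
--     preds = {}
--     for name in cfg:
--         preds[name] = set()
--     for name in cfg:
--         for n, succ in cfg.items():
--             if name in succ:
--                 preds[name].add(n)
--     return preds
-- ===== SOURCE B (Python) =====
-- def get_preds_cfg(cfg):
--     edges = [(s, n) for n, succ in cfg.items() for s in succ]
--     rev = {}
--     for s, n in edges:
--         rev.setdefault(s, []).append(n)
--     return {name: set(rev.get(name, [])) for name in cfg}
-- ===== Notes on version B (the rewrite author's own statement) =====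
-- stated objective: faster
-- what changed: Instead of rescanning all items for each node (nested membership scan), B flattens the CFG into a reversed edge list, groups it once into a reverse-adjacency index, and builds each node's predecessor set by a single lookup.
import Mathlib
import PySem

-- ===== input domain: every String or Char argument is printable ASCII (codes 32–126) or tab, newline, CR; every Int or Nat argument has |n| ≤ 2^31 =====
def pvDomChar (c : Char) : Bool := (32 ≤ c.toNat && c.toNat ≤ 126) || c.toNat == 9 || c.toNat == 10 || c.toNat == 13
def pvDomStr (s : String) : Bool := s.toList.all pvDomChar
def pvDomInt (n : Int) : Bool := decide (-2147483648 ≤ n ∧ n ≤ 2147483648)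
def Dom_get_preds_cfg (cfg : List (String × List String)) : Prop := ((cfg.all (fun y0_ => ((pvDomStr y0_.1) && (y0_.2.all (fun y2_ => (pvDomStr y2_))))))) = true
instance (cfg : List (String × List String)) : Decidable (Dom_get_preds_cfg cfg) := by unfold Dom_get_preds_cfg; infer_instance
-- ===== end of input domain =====

-- B replaces A's nested membership rescans by one flattened reversed-edge pass grouped into a
-- reverse-adjacency index (then per-node lookup) — asymptotically faster; return values proved equal.


-- ===== PORT A =====
def get_preds_cfg (cfg : List (String × List String)) : List (String × List String) :=
  -- preds = {}; for name in cfg: preds[name] = set()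
  let preds : PySem.Dict String (PySem.Set String) :=
    cfg.foldl (fun d p => d.insert p.1 PySem.Set.empty) PySem.Dict.empty
  -- for name in cfg: for n, succ in cfg.items(): if name in succ: preds[name].add(n)
  let preds :=
    cfg.foldl (fun d p =>
      cfg.foldl (fun d q =>
        if p.1 ∈ q.2 then d.modify p.1 PySem.Set.empty (fun s => PySem.Set.add s q.1) else d) d)
      preds
  preds.items

-- ===== PORT B =====
def get_preds_cfg_alt (cfg : List (String × List String)) : List (String × List String) :=
  -- edges = [(s, n) for n, succ in cfg.items() for s in succ]
  let edges : List (String × String) := cfg.flatMap (fun p => p.2.map (fun s => (s, p.1)))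
  -- rev = {}; for s, n in edges: rev.setdefault(s, []).append(n)
  let rev : PySem.Dict String (List String) :=
    edges.foldl (fun d e => d.modify e.1 [] (· ++ [e.2])) PySem.Dict.empty
  -- return {name: set(rev.get(name, [])) for name in cfg}
  (cfg.foldl (fun d p => d.insert p.1 (PySem.Set.ofList (rev.getD p.1 []))) PySem.Dict.empty).items

-- ===== PRECONDITION & SPEC =====
def Spec_get_preds_cfg (cfg : List (String × List String)) (out : List (String × List String)) : Prop := out = get_preds_cfg_alt cfg
instance (cfg : List (String × List String)) (out : List (String × List String)) : Decidable (Spec_get_preds_cfg cfg out) := by unfold Spec_get_preds_cfg; infer_instance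

-- ===== CLAIM (what is proved, stated in full; the proofs are below) =====
def Claim_equal_get_preds_cfg : Prop := ∀ (cfg : List (String × List String)), Dom_get_preds_cfg cfg → Spec_get_preds_cfg cfg (get_preds_cfg cfg)

-- ===== LEMMAS AND PROOFS =====

-- the predecessor set of k after scanning l, starting from s (A's inner accumulation, denotationally)
def pvAddAll (l : List (String × List String)) (k : String) (s : PySem.Set String) : PySem.Set String :=
  l.foldl (fun s q => if k ∈ q.2 then PySem.Set.add s q.1 else s) s

theorem pvAddAll_mono {l : List (String × List String)} {k x : String} {s : PySem.Set String}
    (hx : x ∈ s) : x ∈ pvAddAll l k s := by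
  induction l generalizing s with
  | nil => exact hx
  | cons q l ih =>
    simp only [pvAddAll, List.foldl_cons] at *
    by_cases h : k ∈ q.2
    · simp only [h, if_pos]
      exact ih ((PySem.Set.mem_add s q.1 x).mpr (Or.inl hx))
    · simp only [h]; exact ih hx

theorem mem_pvAddAll {l : List (String × List String)} {k : String} {q : String × List String}
    (hq : q ∈ l) (hk : k ∈ q.2) (s : PySem.Set String) : q.1 ∈ pvAddAll l k s := by
  induction l generalizing s with
  | nil => cases hq
  | cons p l ih =>
    simp only [pvAddAll, List.foldl_cons]
    rcases List.mem_cons.mp hq with hq | hq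
    · subst hq
      simp only [hk, if_pos]
      exact pvAddAll_mono ((PySem.Set.mem_add s q.1 q.1).mpr (Or.inr rfl))
    · by_cases h : k ∈ p.2 <;> simp only [h, if_pos, if_neg, not_false_iff] <;> exact ih hq _

theorem pvAddAll_noop {l : List (String × List String)} {k : String} {s : PySem.Set String}
    (h : ∀ q ∈ l, k ∈ q.2 → q.1 ∈ s) : pvAddAll l k s = s := by
  induction l generalizing s with
  | nil => rfl
  | cons q l ih =>
    simp only [pvAddAll, List.foldl_cons]
    by_cases hk : k ∈ q.2
    · simp only [hk, if_pos]
      rw [PySem.Set.add_of_mem (h q (List.mem_cons_self) hk)]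
      exact ih (fun p hp => h p (List.mem_cons_of_mem _ hp))
    · simp only [hk, if_neg, not_false_iff]
      exact ih (fun p hp => h p (List.mem_cons_of_mem _ hp))

theorem pvAddAll_idem (l : List (String × List String)) (k : String) (s : PySem.Set String) :
    pvAddAll l k (pvAddAll l k s) = pvAddAll l k s :=
  pvAddAll_noop (fun q hq hk => mem_pvAddAll hq hk s)

-- ----- A's inner loop -----
theorem innerA_getD (l : List (String × List String)) (name : String)
    (d : PySem.Dict String (PySem.Set String)) (k : String) :
    (l.foldl (fun d q => if name ∈ q.2 then d.modify name PySem.Set.empty (fun s => PySem.Set.add s q.1) else d) d).getD k PySem.Set.empty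
      = if k = name then pvAddAll l name (d.getD name PySem.Set.empty) else d.getD k PySem.Set.empty := by
  induction l generalizing d with
  | nil =>
    by_cases hk : k = name
    · subst hk; simp [pvAddAll]
    · simp [hk]
  | cons q l ih =>
    simp only [List.foldl_cons, pvAddAll, List.foldl_cons]
    by_cases h : name ∈ q.2
    · simp only [h, if_pos]
      rw [ih]
      by_cases hk : k = name
      · simp [hk, pvAddAll]
      · simp [hk, PySem.Dict.getD_modify]
    · simp only [h, if_false]
      rw [ih]
      simp only [pvAddAll]

theorem innerA_keys (l : List (String × List String)) (name : String)
    (d : PySem.Dict String (PySem.Set String)) (hmem : name ∈ d.keys) :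
    (l.foldl (fun d q => if name ∈ q.2 then d.modify name PySem.Set.empty (fun s => PySem.Set.add s q.1) else d) d).keys = d.keys := by
  induction l generalizing d with
  | nil => rfl
  | cons q l ih =>
    simp only [List.foldl_cons]
    by_cases h : name ∈ q.2
    · simp only [h, if_pos]
      have hk : (d.modify name PySem.Set.empty (fun s => PySem.Set.add s q.1)).keys = d.keys := by
        rw [PySem.Dict.keys_modify,
          PySem.Dict.keys_insert_of_contains _ _ ((PySem.Dict.contains_iff_mem_keys d name).mpr hmem)]
      rw [ih _ (by rw [hk]; exact hmem), hk]
    · simp only [h, if_false]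
      exact ih d hmem

-- ----- A's outer loop -----
theorem outerA_getD (cfg l : List (String × List String))
    (d : PySem.Dict String (PySem.Set String)) (k : String)
    (hinv : d.getD k PySem.Set.empty = PySem.Set.empty
          ∨ d.getD k PySem.Set.empty = pvAddAll cfg k PySem.Set.empty) :
    (l.foldl (fun d p =>
        cfg.foldl (fun d q => if p.1 ∈ q.2 then d.modify p.1 PySem.Set.empty (fun s => PySem.Set.add s q.1) else d) d) d).getD k PySem.Set.empty
      = if k ∈ l.map (·.1) then pvAddAll cfg k PySem.Set.empty else d.getD k PySem.Set.empty := by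
  induction l generalizing d with
  | nil => simp
  | cons p l ih =>
    simp only [List.foldl_cons, List.map_cons, List.mem_cons]
    have hstep := innerA_getD cfg p.1 d k
    by_cases hk : k = p.1
    · have hval : (cfg.foldl (fun d q => if p.1 ∈ q.2 then d.modify p.1 PySem.Set.empty (fun s => PySem.Set.add s q.1) else d) d).getD k PySem.Set.empty
          = pvAddAll cfg k PySem.Set.empty := by
        rw [hstep, if_pos hk, ← hk]
        rcases hinv with h | h
        · rw [h]
        · rw [h, pvAddAll_idem]
      rw [ih _ (Or.inr hval)]
      rcases Decidable.em (k ∈ List.map (fun x => x.1) l) with hl | hl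
      · rw [if_pos hl, if_pos (Or.inl hk)]
      · rw [if_neg hl, if_pos (Or.inl hk), hval]
    · have hval : (cfg.foldl (fun d q => if p.1 ∈ q.2 then d.modify p.1 PySem.Set.empty (fun s => PySem.Set.add s q.1) else d) d).getD k PySem.Set.empty
          = d.getD k PySem.Set.empty := by rw [hstep, if_neg hk]
      rw [ih _ (by rw [hval]; exact hinv)]
      rcases Decidable.em (k ∈ List.map (fun x => x.1) l) with hl | hl
      · rw [if_pos hl, if_pos (Or.inr hl)]
      · rw [if_neg hl, hval, if_neg (fun h => h.elim hk hl)]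

theorem outerA_keys (cfg l : List (String × List String))
    (d : PySem.Dict String (PySem.Set String)) (h : ∀ p ∈ l, p.1 ∈ d.keys) :
    (l.foldl (fun d p =>
        cfg.foldl (fun d q => if p.1 ∈ q.2 then d.modify p.1 PySem.Set.empty (fun s => PySem.Set.add s q.1) else d) d) d).keys = d.keys := by
  induction l generalizing d with
  | nil => rfl
  | cons p l ih =>
    simp only [List.foldl_cons]
    have hk := innerA_keys cfg p.1 d (h p (List.mem_cons_self))
    rw [ih _ (fun q hq => by rw [hk]; exact h q (List.mem_cons_of_mem _ hq)), hk]

-- ----- A's initial dict -----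
theorem init_getD (l : List (String × List String))
    (d : PySem.Dict String (PySem.Set String)) (k : String)
    (h : d.getD k PySem.Set.empty = PySem.Set.empty) :
    (l.foldl (fun d p => d.insert p.1 PySem.Set.empty) d).getD k PySem.Set.empty = PySem.Set.empty := by
  induction l generalizing d with
  | nil => exact h
  | cons p l ih =>
    simp only [List.foldl_cons]
    refine ih _ ?_
    rw [PySem.Dict.getD_insert]
    by_cases hk : k = p.1
    · rw [if_pos hk]
    · rw [if_neg hk]; exact h

theorem init_keys (cfg : List (String × List String)) :
    (cfg.foldl (fun (d : PySem.Dict String (PySem.Set String)) p => d.insert p.1 PySem.Set.empty) PySem.Dict.empty).keys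
      = PySem.Set.ofList (cfg.map (·.1)) := by
  rw [PySem.Dict.keys_foldl_insert_key cfg (·.1) (fun _ _ => PySem.Set.empty)]
  simp [PySem.Set.ofList_eq_foldl, PySem.Set.update]

-- ----- B's output dict: insert with a key-determined value -----
theorem outB_getD (v : String → PySem.Set String) (l : List (String × List String))
    (d : PySem.Dict String (PySem.Set String)) (k : String) :
    (l.foldl (fun d p => d.insert p.1 (v p.1)) d).getD k PySem.Set.empty
      = if k ∈ l.map (·.1) then v k else d.getD k PySem.Set.empty := by
  induction l generalizing d with
  | nil => simp
  | cons p l ih =>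
    simp only [List.foldl_cons, List.map_cons, List.mem_cons]
    rw [ih, PySem.Dict.getD_insert]
    by_cases hk : k = p.1
    · by_cases hl : k ∈ l.map (·.1) <;> simp [hk]
    · by_cases hl : k ∈ l.map (·.1) <;> simp [hl, hk]

theorem outB_keys (v : String → PySem.Set String) (cfg : List (String × List String)) :
    (cfg.foldl (fun (d : PySem.Dict String (PySem.Set String)) p => d.insert p.1 (v p.1)) PySem.Dict.empty).keys
      = PySem.Set.ofList (cfg.map (·.1)) := by
  rw [PySem.Dict.keys_foldl_insert_key cfg (·.1) (fun _ p => v p.1)]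
  simp [PySem.Set.ofList_eq_foldl, PySem.Set.update]

-- ----- B's grouped edge list, per successor list -----
theorem pvInner (k n : String) (succ : List String) (s : PySem.Set String) :
    (((succ.map (fun s' => (s', n))).filter (fun e => e.1 == k)).map (·.2)).foldl PySem.Set.add s
      = if k ∈ succ then PySem.Set.add s n else s := by
  induction succ generalizing s with
  | nil => simp
  | cons s0 t ih =>
    simp only [List.map_cons, List.filter_cons, List.mem_cons]
    by_cases h : s0 = k
    · have hb : ((s0, n).1 == k) = true := by simp [h]
      simp only [hb, if_pos, List.map_cons, List.foldl_cons]
      rw [ih]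
      have hk : (k = s0 ∨ k ∈ t) := Or.inl h.symm
      by_cases ht : k ∈ t
      · rw [if_pos ht, if_pos hk, PySem.Set.add_of_mem ((PySem.Set.mem_add s n n).mpr (Or.inr rfl))]
      · rw [if_neg ht, if_pos hk]
    · have hb : ((s0, n).1 == k) = false := by simp [fun he : s0 = k => h he]
      simp only [hb, Bool.false_eq_true, if_false]
      rw [ih]
      by_cases ht : k ∈ t
      · rw [if_pos ht, if_pos (Or.inr ht)]
      · rw [if_neg ht, if_neg (by rintro (rfl | hc); exact h rfl; exact ht hc)]

-- ----- B's grouped edge list equals A's accumulation -----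
theorem pvEdge (k : String) (cfg : List (String × List String)) (s : PySem.Set String) :
    ((((cfg.flatMap (fun p => p.2.map (fun s' => (s', p.1)))).filter (fun e => e.1 == k)).map (·.2)).foldl PySem.Set.add s)
      = pvAddAll cfg k s := by
  induction cfg generalizing s with
  | nil => simp [pvAddAll]
  | cons p l ih =>
    simp only [List.flatMap_cons, List.filter_append, List.map_append, List.foldl_append,
      pvAddAll, List.foldl_cons]
    rw [pvInner k p.1 p.2 s]
    by_cases h : k ∈ p.2
    · simp only [h, if_pos]
      exact ih (PySem.Set.add s p.1)
    · simp only [h, if_false]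
      exact ih s

-- ===== VERDICT (by name: the statement is the Claim_ definition above) =====
theorem get_preds_cfg_spec : Claim_equal_get_preds_cfg := by
  intro cfg _
  unfold Spec_get_preds_cfg get_preds_cfg get_preds_cfg_alt
  -- A's side
  set init := cfg.foldl (fun (d : PySem.Dict String (PySem.Set String)) p => d.insert p.1 PySem.Set.empty) PySem.Dict.empty with hinit
  have hinitgetD : ∀ k, init.getD k PySem.Set.empty = PySem.Set.empty := by
    intro k
    exact init_getD cfg PySem.Dict.empty k (by simp [PySem.Dict.getD_empty])
  have hAkeys0 : init.keys = PySem.Set.ofList (cfg.map (·.1)) := init_keys cfg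
  have hnodup : (PySem.Set.ofList (cfg.map (·.1))).Nodup := PySem.Set.nodup_ofList _
  have hAkeys := outerA_keys cfg cfg init
    (fun p hp => by rw [hAkeys0]; exact (PySem.Set.mem_ofList _ _).mpr (List.mem_map.mpr ⟨p, hp, rfl⟩))
  -- B's side
  have hBkeys := outB_keys
    (fun k => PySem.Set.ofList (((cfg.flatMap (fun p => p.2.map (fun s => (s, p.1)))).foldl
      (fun d e => d.modify e.1 [] (· ++ [e.2])) PySem.Dict.empty).getD k [])) cfg
  rw [PySem.Dict.items_eq_map_keys _ (by rw [hAkeys, hAkeys0]; exact hnodup) PySem.Set.empty,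
      PySem.Dict.items_eq_map_keys _ (by rw [hBkeys]; exact hnodup) PySem.Set.empty,
      hAkeys, hAkeys0, hBkeys]
  refine List.map_congr_left (fun k hkmem => ?_)
  have hkm : k ∈ cfg.map (·.1) := (PySem.Set.mem_ofList _ _).mp hkmem
  -- A's value at k
  rw [outerA_getD cfg cfg init k (Or.inl (hinitgetD k)), if_pos hkm]
  -- B's value at k
  rw [outB_getD (fun k => PySem.Set.ofList (((cfg.flatMap (fun p => p.2.map (fun s => (s, p.1)))).foldl
        (fun d e => d.modify e.1 [] (· ++ [e.2])) PySem.Dict.empty).getD k [])) cfg PySem.Dict.empty k,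
      if_pos hkm, PySem.Dict.getD_foldl_modify_append, PySem.Dict.getD_empty]
  rw [PySem.Set.ofList_eq_foldl, List.nil_append]
  exact congrArg (Prod.mk k) (pvEdge k cfg PySem.Set.empty).symm
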